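-- pv_equiv track=rewrite | github.com/michaelseno/job-intelligence-platform | app/web/routes.py | map_source_errors
-- ===== SOURCE A (Python) =====
-- from collections import defaultdict
--
-- def map_source_errors(errors: list[str]) -> dict[str, list[str]]:
--     field_map: dict[str, list[str]] = defaultdict(list)
--     for error in errors:
--         if "name" in error:
--             field_map["name"].append(error)
--         elif "source_type" in error:
--             field_map["source_type"].append(error)
--         elif "base_url" in error:
--             field_map["base_url"].append(error)
--         elif "external_identifier" in error:
--             field_map["external_identifier"].append(error)
--         elif "adapter_key" in error:
--             field_map["adapter_key"].append(error)
--         else: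
--             field_map["__all__"].append(error)
--     return dict(field_map)
-- ===== SOURCE B (Python) =====
-- FIELDS = ["name", "source_type", "base_url", "external_identifier", "adapter_key"]
--
--
-- def _classify(error):
--     for field in FIELDS:
--         if field in error:
--             return field
--     return "__all__"
--
--
-- def map_source_errors(errors):
--     labels = [_classify(e) for e in errors]
--     keys = []
--     for label in labels:
--         if label not in keys:
--             keys.append(label)
--     return {k: [e for e, l in zip(errors, labels) if l == k] for k in keys}
-- ===== Notes on version B (the rewrite author's own statement) =====
-- stated objective: alternative
-- what changed: Replaces the elif chain that appends into a defaultdict with a classify-then-group decomposition: each error is labelled by a table-driven classifier over an ordered keyword list, then the result dict is built per first-seen label by filtering the labelled errors.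
import Mathlib
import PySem

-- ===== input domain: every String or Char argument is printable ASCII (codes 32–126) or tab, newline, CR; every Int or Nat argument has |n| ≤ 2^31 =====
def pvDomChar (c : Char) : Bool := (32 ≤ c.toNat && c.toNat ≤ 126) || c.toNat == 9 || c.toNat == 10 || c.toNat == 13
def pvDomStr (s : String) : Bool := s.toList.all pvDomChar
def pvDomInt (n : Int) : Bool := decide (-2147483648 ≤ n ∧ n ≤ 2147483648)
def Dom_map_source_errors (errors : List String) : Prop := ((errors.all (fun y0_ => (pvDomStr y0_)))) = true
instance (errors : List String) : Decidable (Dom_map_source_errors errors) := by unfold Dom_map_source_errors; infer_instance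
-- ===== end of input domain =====

-- B replaces A's elif-chain/defaultdict loop by a classify-then-group decomposition (label each error, then build each bucket by filtering); alternative structure, same cost.


-- ===== PORT A =====
def map_source_errors (errors : List String) : List (String × List String) :=
  (errors.foldl (fun d error =>
      if PySem.Str.isIn "name" error then d.modify "name" [] (· ++ [error])
      else if PySem.Str.isIn "source_type" error then d.modify "source_type" [] (· ++ [error])
      else if PySem.Str.isIn "base_url" error then d.modify "base_url" [] (· ++ [error])
      else if PySem.Str.isIn "external_identifier" error then d.modify "external_identifier" [] (· ++ [error])
      else if PySem.Str.isIn "adapter_key" error then d.modify "adapter_key" [] (· ++ [error])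
      else d.modify "__all__" [] (· ++ [error]))
    (PySem.Dict.empty)).items

-- ===== PORT B =====
def pvFields : List String := ["name", "source_type", "base_url", "external_identifier", "adapter_key"]

def pvClassify (error : String) : String :=
  match pvFields.find? (fun field => PySem.Str.isIn field error) with
  | some field => field
  | none => "__all__"

def map_source_errors_alt (errors : List String) : List (String × List String) :=
  let labels := errors.map pvClassify
  let keys := PySem.Set.ofList labels
  keys.map (fun k => (k, ((errors.zip labels).filter (fun p => p.2 == k)).map (·.1)))

-- ===== PRECONDITION & SPEC =====
def Spec_map_source_errors (errors : List String) (out : List (String × List String)) : Prop := out = map_source_errors_alt errors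
instance (errors : List String) (out : List (String × List String)) : Decidable (Spec_map_source_errors errors out) := by unfold Spec_map_source_errors; infer_instance

-- ===== CLAIM (what is proved, stated in full; the proofs are below) =====
def Claim_equal_map_source_errors : Prop := ∀ (errors : List String), Dom_map_source_errors errors → Spec_map_source_errors errors (map_source_errors errors)

-- ===== LEMMAS AND PROOFS =====

-- A's elif chain appends exactly at the key B's classifier computes.
theorem pv_step_eq (d : PySem.Dict String (List String)) (e : String) :
    (if PySem.Str.isIn "name" e then d.modify "name" [] (· ++ [e])
     else if PySem.Str.isIn "source_type" e then d.modify "source_type" [] (· ++ [e])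
     else if PySem.Str.isIn "base_url" e then d.modify "base_url" [] (· ++ [e])
     else if PySem.Str.isIn "external_identifier" e then d.modify "external_identifier" [] (· ++ [e])
     else if PySem.Str.isIn "adapter_key" e then d.modify "adapter_key" [] (· ++ [e])
     else d.modify "__all__" [] (· ++ [e]))
    = d.modify (pvClassify e) [] (· ++ [e]) := by
  simp only [pvClassify, pvFields, List.find?]
  cases PySem.Str.isIn "name" e <;>
    cases PySem.Str.isIn "source_type" e <;>
      cases PySem.Str.isIn "base_url" e <;>
        cases PySem.Str.isIn "external_identifier" e <;>
          cases PySem.Str.isIn "adapter_key" e <;> simp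

-- The two filtering shapes both extract the errors classified as k, in order.
theorem pv_filter_eq (errors : List String) (k : String) :
    ((errors.map (fun e => (pvClassify e, e))).filter (fun p => p.1 == k)).map (·.2)
    = ((errors.zip (errors.map pvClassify)).filter (fun p => p.2 == k)).map (·.1) := by
  induction errors with
  | nil => rfl
  | cons e rest ih =>
    by_cases h : pvClassify e = k <;> simp [h, ih]

theorem map_source_errors_spec : Claim_equal_map_source_errors := by
  unfold Claim_equal_map_source_errors
  intro errors _
  unfold Spec_map_source_errors map_source_errors map_source_errors_alt
  have hfold :
      (errors.foldl (fun d error =>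
        if PySem.Str.isIn "name" error then d.modify "name" [] (· ++ [error])
        else if PySem.Str.isIn "source_type" error then d.modify "source_type" [] (· ++ [error])
        else if PySem.Str.isIn "base_url" error then d.modify "base_url" [] (· ++ [error])
        else if PySem.Str.isIn "external_identifier" error then d.modify "external_identifier" [] (· ++ [error])
        else if PySem.Str.isIn "adapter_key" error then d.modify "adapter_key" [] (· ++ [error])
        else d.modify "__all__" [] (· ++ [error])) (PySem.Dict.empty))
      = (errors.map (fun e => (pvClassify e, e))).foldl
          (fun d p => d.modify p.1 [] (· ++ [p.2])) PySem.Dict.empty := by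
    rw [List.foldl_map]
    congr 1
    funext d e
    exact pv_step_eq d e
  rw [hfold]
  set L := errors.map (fun e => (pvClassify e, e)) with hL
  set D := L.foldl (fun d p => d.modify p.1 [] (· ++ [p.2])) PySem.Dict.empty with hD
  have hnodup : D.keys.Nodup := by
    rw [hD]
    exact PySem.Dict.nodup_keys_foldl_modify_key L (fun p => p.1) [] (fun _ p v => v ++ [p.2])
      PySem.Dict.empty (by simp [PySem.Dict.keys_empty])
  have hkeys : D.keys = PySem.Set.ofList (errors.map pvClassify) := by
    rw [hD]
    rw [PySem.Dict.keys_foldl_modify_key L (fun p => p.1) [] (fun _ p v => v ++ [p.2])]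
    simp [PySem.Dict.keys_empty, PySem.Set.update_nil_left, hL, List.map_map, Function.comp_def]
  rw [PySem.Dict.items_eq_map_keys D hnodup [], hkeys]
  apply List.map_congr_left
  intro k _
  have hg : D.getD k [] = (L.filter (fun p => p.1 == k)).map (·.2) := by
    rw [hD, PySem.Dict.getD_foldl_modify_append L PySem.Dict.empty k]
    simp [PySem.Dict.getD_empty]
  rw [hg, hL, pv_filter_eq]
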